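-- pv_equiv track=rewrite | github.com/centogattini/medical_chatbot | utils.py | time_to_text
-- ===== SOURCE A (Python) =====
-- def time_to_text(time):
--     res = []
--     h = '9'
--     m = '00'
--     for i in time:
--         cur_time = h + ":" + m
--         if m == '00':
--             m = '30'
--         else:
--             h = str(int(h)+1)
--             m = '00'
--
--         if i == 0:
--             res.append(cur_time)
--
--     return res
-- ===== SOURCE B (Python) =====
-- def time_to_text(time):
--     # Each index i corresponds to the slot starting at hour 9 + i//2,
--     # minutes '00' for even i and '30' for odd i; no running clock state.
--     return [f"{9 + i // 2}:{'00' if i % 2 == 0 else '30'}"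
--             for i, v in enumerate(time) if v == 0]
-- ===== Notes on version B (the rewrite author's own statement) =====
-- stated objective: simpler
-- what changed: Replaces A's threaded h/m clock accumulator (which re-parses the hour string with int(h) and re-renders it with str each step) by a single comprehension computing each slot directly from its index: hour = 9 + i//2, minute = '00'/'30' by parity; the measured speedup is the removed per-step str/int round-trip.
import Mathlib
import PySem

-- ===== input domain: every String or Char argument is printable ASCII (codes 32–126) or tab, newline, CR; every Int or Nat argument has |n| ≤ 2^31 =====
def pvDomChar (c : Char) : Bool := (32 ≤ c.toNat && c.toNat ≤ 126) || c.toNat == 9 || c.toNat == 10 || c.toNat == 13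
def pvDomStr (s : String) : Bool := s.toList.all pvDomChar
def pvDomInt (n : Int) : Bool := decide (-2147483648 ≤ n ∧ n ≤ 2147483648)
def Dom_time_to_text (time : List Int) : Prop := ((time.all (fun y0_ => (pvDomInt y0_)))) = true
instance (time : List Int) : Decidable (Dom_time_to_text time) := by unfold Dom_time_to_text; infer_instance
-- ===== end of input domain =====

-- B replaces A's threaded hour/minute accumulator by a per-index closed-form slot formula (same O(n) cost, simpler).


-- ===== PORT A =====
-- A's loop threads res, the hour h and the minute string m through the list.
-- Python keeps h as a string and re-parses it each step with int(h), which never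
-- fails (h is always str of an integer); the port carries that integer and renders
-- str(h) at the use site (cur_time = h + ":" + m) — value-exact on every input.
def timeToTextLoopA : List Int → List String → Int → String → List String
  | [], res, _, _ => res
  | i :: rest, res, h, m =>
    let cur := PySem.Int.toStr h ++ ":" ++ m          -- cur_time = h + ":" + m
    let h' := if m = "00" then h else h + 1           -- h = str(int(h)+1) in the else-branch
    let m' := if m = "00" then "30" else "00"
    timeToTextLoopA rest (if i = 0 then res ++ [cur] else res) h' m'

def time_to_text (time : List Int) : List String :=
  timeToTextLoopA time [] 9 "00"

-- ===== PORT B =====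
-- B: one comprehension over enumerate(time); the slot for index i is computed
-- directly: hour 9 + i//2, minutes '00' for even i and '30' for odd i.
def timeSlotB (p : Int × Int) : Option String :=
  if p.2 = 0 then
    some (PySem.Int.toStr (9 + PySem.Int.floordiv p.1 2) ++ ":" ++
          (if PySem.Int.mod p.1 2 = 0 then "00" else "30"))
  else none

def time_to_text_alt (time : List Int) : List String :=
  (PySem.List.enumerate time).filterMap timeSlotB

-- ===== PRECONDITION & SPEC =====
def Spec_time_to_text (time : List Int) (out : List String) : Prop := out = time_to_text_alt time
instance (time : List Int) (out : List String) : Decidable (Spec_time_to_text time out) := by unfold Spec_time_to_text; infer_instance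

-- ===== CLAIM (what is proved, stated in full; the proofs are below) =====
def Claim_equal_time_to_text : Prop := ∀ (time : List Int), Dom_time_to_text time → Spec_time_to_text time (time_to_text time)

-- ===== LEMMAS AND PROOFS =====

-- A's loop state after k steps is exactly (hour 9 + k/2, minute by parity of k),
-- so from any such state the loop produces B's per-index slots.
lemma timeToTextLoopA_eq (rest : List Int) : ∀ (k : Nat) (res : List String),
    timeToTextLoopA rest res (9 + ((k / 2 : Nat) : Int)) (if k % 2 = 0 then "00" else "30")
      = res ++ (PySem.List.enumerate rest (k : Int)).filterMap timeSlotB := by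
  induction rest with
  | nil => intro k res; simp [timeToTextLoopA, PySem.List.enumerate_nil]
  | cons i rest ih =>
    intro k res
    have hslot : timeSlotB ((k : Int), i)
        = if i = 0 then
            some (PySem.Int.toStr (9 + ((k / 2 : Nat) : Int)) ++ ":" ++
                  (if k % 2 = 0 then "00" else "30"))
          else none := by
      have hd : PySem.Int.floordiv (k : Int) 2 = ((k / 2 : Nat) : Int) :=
        PySem.Int.floordiv_natCast k 2
      have hm : PySem.Int.mod (k : Int) 2 = ((k % 2 : Nat) : Int) :=
        PySem.Int.mod_natCast k 2
      change (if i = 0 then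
          some (PySem.Int.toStr (9 + PySem.Int.floordiv (k : Int) 2) ++ ":" ++
            (if PySem.Int.mod (k : Int) 2 = 0 then "00" else "30"))
        else none) = _
      rw [hd, hm]
      by_cases hk : k % 2 = 0
      · rw [hk]; norm_num
      · have hz : ((k % 2 : Nat) : Int) ≠ 0 := by exact_mod_cast hk
        rw [if_neg hz, if_neg hk]
    rcases Nat.even_or_odd k with hk | hk
    · have hk0 : k % 2 = 0 := Nat.even_iff.mp hk
      have h2 : (k + 1) / 2 = k / 2 := by omega
      have h3 : (k + 1) % 2 ≠ 0 := by omega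
      have step : timeToTextLoopA (i :: rest) res (9 + ((k / 2 : Nat) : Int)) "00"
          = timeToTextLoopA rest
              (if i = 0 then
                 res ++ [PySem.Int.toStr (9 + ((k / 2 : Nat) : Int)) ++ ":" ++ "00"]
               else res)
              (9 + (((k + 1) / 2 : Nat) : Int)) "30" := by
        simp [timeToTextLoopA, h2]
      rw [if_pos hk0] at *
      rw [step]
      have hrec := ih (k + 1) (if i = 0 then
          res ++ [PySem.Int.toStr (9 + ((k / 2 : Nat) : Int)) ++ ":" ++ "00"] else res)
      rw [if_neg h3] at hrec
      rw [hrec, PySem.List.enumerate_cons]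
      have hc : ((k : Int) + 1) = ((k + 1 : Nat) : Int) := by push_cast; ring
      rw [hc]
      by_cases hi : i = 0
      · subst hi; simp [hslot]
      · simp [hslot, hi]
    · have hk0 : ¬ (k % 2 = 0) := by
        have := Nat.odd_iff.mp hk; omega
      have h2 : (k + 1) / 2 = k / 2 + 1 := by omega
      have h3 : (k + 1) % 2 = 0 := by omega
      have step : timeToTextLoopA (i :: rest) res (9 + ((k / 2 : Nat) : Int)) "30"
          = timeToTextLoopA rest
              (if i = 0 then
                 res ++ [PySem.Int.toStr (9 + ((k / 2 : Nat) : Int)) ++ ":" ++ "30"]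
               else res)
              (9 + (((k + 1) / 2 : Nat) : Int)) "00" := by
        have hh : (9 + ((k / 2 : Nat) : Int)) + 1 = 9 + (((k + 1) / 2 : Nat) : Int) := by
          rw [h2]; push_cast; ring
        rw [← hh]; rfl
      rw [if_neg hk0] at *
      rw [step]
      have hrec := ih (k + 1) (if i = 0 then
          res ++ [PySem.Int.toStr (9 + ((k / 2 : Nat) : Int)) ++ ":" ++ "30"] else res)
      rw [if_pos h3] at hrec
      rw [hrec, PySem.List.enumerate_cons]
      have hc : ((k : Int) + 1) = ((k + 1 : Nat) : Int) := by push_cast; ring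
      rw [hc]
      by_cases hi : i = 0
      · subst hi; simp [hslot]
      · simp [hslot, hi]

-- ===== VERDICT (by name: the statement is the Claim_ definition above) =====
theorem time_to_text_spec : Claim_equal_time_to_text := by
  intro time _
  show time_to_text time = time_to_text_alt time
  have h := timeToTextLoopA_eq time 0 []
  simpa [time_to_text, time_to_text_alt] using h
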